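-- pv_equiv track=rewrite | github.com/asg58/vorta | frontend/components/voice/adaptive_noise_cancellation.py | _smooth_vad_decisions
-- ===== SOURCE A (Python) =====
-- from typing import Dict, List, Optional, Any, Callable, Union, Tuple
--
-- def _smooth_vad_decisions(decisions: List[bool]) -> List[bool]:
--     """Apply smoothing to VAD decisions"""
--     if len(decisions) < 3:
--         return decisions
--
--     smoothed = []
--
--     for i in range(len(decisions)):
--         # Use median filter for smoothing
--         start = max(0, i - 1)
--         end = min(len(decisions), i + 2)
--         window_decisions = decisions[start:end]
--
--         # Majority vote
--         voice_votes = sum(window_decisions)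
--         smoothed_decision = voice_votes > len(window_decisions) / 2
--         smoothed.append(smoothed_decision)
--
--     return smoothed
-- ===== SOURCE B (Python) =====
-- def _smooth_vad_decisions(decisions):
--     """Apply smoothing to VAD decisions via a prefix-sum (cumulative vote) table:
--     stage 1 builds cum with cum[k] = number of True in decisions[:k]; stage 2 reads
--     each window's vote count as a difference of two table entries."""
--     n = len(decisions)
--     if n < 3:
--         return decisions
--     cum = [0]
--     for d in decisions:
--         cum.append(cum[-1] + (1 if d else 0))
--     out = []
--     for i in range(n):
--         start = max(0, i - 1)
--         end = min(n, i + 2)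
--         out.append(cum[end] - cum[start] > (end - start) / 2)
--     return out
-- ===== Notes on version B (the rewrite author's own statement) =====
-- stated objective: alternative
-- what changed: Replaces A's per-index window slicing and sum() vote counting with a two-stage prefix-sum table: first build cum[k] = number of True in decisions[:k], then read each window's vote count as cum[end]-cum[start], so no window is ever materialised or re-counted.
import Mathlib
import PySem

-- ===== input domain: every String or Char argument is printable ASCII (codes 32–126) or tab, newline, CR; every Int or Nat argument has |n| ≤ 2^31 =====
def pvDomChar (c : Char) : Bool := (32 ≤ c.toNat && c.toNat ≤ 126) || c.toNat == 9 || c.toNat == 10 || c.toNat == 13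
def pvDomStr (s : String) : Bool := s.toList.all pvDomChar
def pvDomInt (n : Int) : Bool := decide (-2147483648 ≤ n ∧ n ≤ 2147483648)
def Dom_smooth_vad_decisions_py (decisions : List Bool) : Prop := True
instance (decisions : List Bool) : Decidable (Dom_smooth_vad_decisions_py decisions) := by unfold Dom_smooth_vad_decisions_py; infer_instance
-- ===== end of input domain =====

-- B replaces A's per-index window slicing + sum() vote counting by a two-stage
-- prefix-sum table (cum[k] = trues in decisions[:k]); each window vote is a
-- difference of two table entries (objective: alternative decomposition).

-- ===== PORT A =====
-- Python compares 'voice_votes > len(window)/2' with float division; for integers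
-- this is exactly '2*voice_votes > len(window)' — ported as that exact integer test.
def svdWindowVote (decisions : List Bool) (i : Int) : Bool :=
  let start : Int := max 0 (i - 1)
  let e : Int := min (decisions.length : Int) (i + 2)
  let window := PySem.List.slice decisions (some start) (some e)
  let votes : Int := (window.map fun b => if b then (1 : Int) else 0).sum
  decide (2 * votes > (window.length : Int))

def smooth_vad_decisions_py (decisions : List Bool) : List Bool :=
  if decisions.length < 3 then decisions
  else
    (PySem.List.pyRange 0 decisions.length 1).foldl
      (fun smoothed i => smoothed ++ [svdWindowVote decisions i]) []

-- ===== PORT B =====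
-- 'cum.append(cum[-1] + (1 if d else 0))': cum[-1] is pyGetD cum (-1).
def svdCumStep (cum : List Int) (d : Bool) : List Int :=
  cum ++ [PySem.List.pyGetD cum (-1) 0 + (if d then 1 else 0)]

-- the body of Source B's output loop ('cum[end]-cum[start] > (end-start)/2', the same
-- exact integer form of the float comparison as in port A)
def svdTableVote (cum : List Int) (n i : Int) : Bool :=
  let start : Int := max 0 (i - 1)
  let e : Int := min n (i + 2)
  decide (2 * (PySem.List.pyGetD cum e 0 - PySem.List.pyGetD cum start 0) > e - start)

def smooth_vad_decisions_py_alt (decisions : List Bool) : List Bool :=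
  let n : Int := decisions.length
  if decisions.length < 3 then decisions
  else
    let cum := decisions.foldl svdCumStep [(0 : Int)]
    (PySem.List.pyRange 0 n 1).foldl (fun out i => out ++ [svdTableVote cum n i]) []

-- ===== PRECONDITION & SPEC =====
def Spec_smooth_vad_decisions_py (decisions : List Bool) (out : List Bool) : Prop := out = smooth_vad_decisions_py_alt decisions
instance (decisions : List Bool) (out : List Bool) : Decidable (Spec_smooth_vad_decisions_py decisions out) := by unfold Spec_smooth_vad_decisions_py; infer_instance

-- ===== CLAIM (what is proved, stated in full; the proofs are below) =====
def Claim_equal_smooth_vad_decisions_py : Prop := ∀ (decisions : List Bool), Dom_smooth_vad_decisions_py decisions → Spec_smooth_vad_decisions_py decisions (smooth_vad_decisions_py decisions)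

-- ===== LEMMAS AND PROOFS =====

/-- Vote count of a window, as A computes it. -/
def svdCnt (l : List Bool) : Int := (l.map fun b => if b then (1 : Int) else 0).sum

theorem svdCnt_nil : svdCnt [] = 0 := rfl

theorem svdCnt_cons (d : Bool) (l : List Bool) :
    svdCnt (d :: l) = (if d then (1 : Int) else 0) + svdCnt l := by
  simp [svdCnt]

theorem svdCnt_append (a b : List Bool) : svdCnt (a ++ b) = svdCnt a + svdCnt b := by
  simp [svdCnt]

/-- The cum-building fold produces exactly the prefix-vote table. -/
theorem svdCum_spec (l : List Bool) : ∀ (acc : List Int) (c : Int),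
    l.foldl svdCumStep (acc ++ [c]) =
      acc ++ (List.range (l.length + 1)).map (fun k => c + svdCnt (l.take k)) := by
  induction l with
  | nil => intro acc c; simp [List.range_succ, svdCnt]
  | cons d t ih =>
    intro acc c
    have hstep : svdCumStep (acc ++ [c]) d = (acc ++ [c]) ++ [c + (if d then 1 else 0)] := by
      simp [svdCumStep, PySem.List.pyGetD_neg_one_append_singleton]
    rw [List.foldl_cons, hstep, ih (acc ++ [c]) (c + (if d then 1 else 0))]
    rw [List.append_assoc]
    congr 1
    conv_rhs => rw [List.range_succ_eq_map]
    rw [List.map_cons, List.map_map]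
    simp only [List.take_zero, svdCnt_nil, add_zero, List.singleton_append]
    congr 1
    apply List.map_congr_left
    intro k _
    simp [Function.comp, svdCnt_cons, List.take_succ_cons]
    ring

theorem svdCum_getD (l : List Bool) (j : Nat) (hj : j ≤ l.length) :
    PySem.List.pyGetD (l.foldl svdCumStep [(0 : Int)]) (j : Int) 0 = svdCnt (l.take j) := by
  have hc : l.foldl svdCumStep [(0 : Int)] =
      (List.range (l.length + 1)).map (fun k => svdCnt (l.take k)) := by
    have := svdCum_spec l [] 0
    simpa using this
  rw [hc, PySem.List.pyGetD_natCast]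
  rw [List.getD_eq_getElem _ _ (by simp; omega), List.getElem_map, List.getElem_range]

theorem svdElem_eq (l : List Bool) (k : Nat) (hk : k < l.length) :
    svdWindowVote l (k : Int) =
      svdTableVote (l.foldl svdCumStep [(0 : Int)]) (l.length : Int) (k : Int) := by
  set n := l.length with hn
  set s : Nat := k - 1 with hs
  set e : Nat := min n (k + 2) with he
  have hse : s ≤ e := by omega
  have hen : e ≤ n := by omega
  have hsI : max 0 ((k : Int) - 1) = ((s : Nat) : Int) := by omega
  have heI : min ((n : Nat) : Int) ((k : Int) + 2) = ((e : Nat) : Int) := by omega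
  unfold svdWindowVote svdTableVote
  simp only [← hn, hsI, heI]
  rw [PySem.List.slice_natCast]
  rw [svdCum_getD l e hen, svdCum_getD l s (by omega)]
  have hsplit : l.take e = l.take s ++ (l.drop s).take (e - s) := by
    conv_lhs => rw [show e = s + (e - s) from by omega]
    exact List.take_add
  have hcnt : svdCnt (l.take e) - svdCnt (l.take s) = svdCnt ((l.drop s).take (e - s)) := by
    rw [hsplit, svdCnt_append]; ring
  have hwlen : ((l.drop s).take (e - s)).length = e - s := by
    simp [List.length_take, List.length_drop]; omega
  have hfold : ((((l.drop s).take (e - s)).map fun b => if b then (1 : Int) else 0).sum)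
      = svdCnt ((l.drop s).take (e - s)) := rfl
  rw [hfold, hcnt, hwlen, decide_eq_decide]
  have hcast : ((e - s : Nat) : Int) = (e : Int) - (s : Int) := by omega
  constructor <;> intro h <;> omega

-- ===== VERDICT (by name: the statement is the Claim_ definition above) =====
theorem smooth_vad_decisions_py_spec : Claim_equal_smooth_vad_decisions_py := by
  intro l _
  unfold Spec_smooth_vad_decisions_py smooth_vad_decisions_py smooth_vad_decisions_py_alt
  by_cases h3 : l.length < 3
  · simp [h3]
  · rw [if_neg h3, if_neg h3]
    rw [PySem.List.foldl_append_singleton_eq_map, PySem.List.foldl_append_singleton_eq_map]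
    simp only [List.nil_append]
    apply List.map_congr_left
    intro i hi
    rw [PySem.List.mem_pyRange_one] at hi
    obtain ⟨h0, hn⟩ := hi
    have hik : i = ((i.toNat : Nat) : Int) := by omega
    rw [hik]
    exact svdElem_eq l i.toNat (by omega)
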